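-- pv_equiv track=rewrite | github.com/gustino7/Tugas-Akhir-Yara-Rules | compare_string.py | find_common_strings
-- ===== SOURCE A (Python) =====
-- def find_common_strings(string_lists, min_length=5, max_length=20):
--     if not string_lists:
--         return []
--
--     # Filter empty lists
--     valid_lists = [lst for lst in string_lists if lst]
--     if not valid_lists:
--         return []
--
--     # Start with the set of strings from the first list
--     common = set(valid_lists[0])
--
--     # Find intersection with all other lists
--     for s in valid_lists[1:]:
--         common.intersection_update(s)
--
--     # Filter by minimum length
--     return sorted([s for s in common if len(s) >= min_length and len(s) <= max_length])
-- ===== SOURCE B (Python) =====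
-- def find_common_strings(string_lists, min_length=5, max_length=20):
--     # One pass: count, for each distinct string, how many non-empty lists contain it;
--     # a string is common iff its count equals the number of non-empty lists.
--     valid_count = 0
--     counts = {}
--     for lst in string_lists:
--         if lst:
--             valid_count += 1
--             for s in dict.fromkeys(lst):  # dedup, deterministic order
--                 counts[s] = counts.get(s, 0) + 1
--     if valid_count == 0:
--         return []
--     return sorted(s for s, c in counts.items()
--                   if c == valid_count and min_length <= len(s) <= max_length)
-- ===== Notes on version B (the rewrite author's own statement) =====
-- stated objective: alternative
-- what changed: Replaces the iterated set-intersection with a single counting pass: a dict maps each distinct string to the number of non-empty lists containing it, and a string is common iff its count equals the number of non-empty lists.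
import Mathlib
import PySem

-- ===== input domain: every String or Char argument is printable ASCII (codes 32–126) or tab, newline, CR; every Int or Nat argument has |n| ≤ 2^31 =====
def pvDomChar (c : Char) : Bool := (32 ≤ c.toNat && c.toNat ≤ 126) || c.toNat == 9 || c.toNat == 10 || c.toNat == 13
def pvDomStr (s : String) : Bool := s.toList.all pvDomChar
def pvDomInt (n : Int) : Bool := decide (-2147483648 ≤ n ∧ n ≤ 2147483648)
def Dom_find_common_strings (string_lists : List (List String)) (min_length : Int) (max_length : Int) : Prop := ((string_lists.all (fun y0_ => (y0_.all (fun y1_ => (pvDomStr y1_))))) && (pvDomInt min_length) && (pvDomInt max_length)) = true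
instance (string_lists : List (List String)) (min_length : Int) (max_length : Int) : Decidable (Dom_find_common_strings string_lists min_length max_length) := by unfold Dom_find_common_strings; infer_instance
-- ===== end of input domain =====

-- B replaces A's iterated set-intersection with a single counting pass over the lists (alternative decomposition, same cost).


-- ===== PORT A =====
def find_common_strings (string_lists : List (List String)) (min_length : Int) (max_length : Int) : List String :=
  if string_lists.isEmpty then []
  else
    let valid_lists := string_lists.filter (fun lst => !lst.isEmpty)
    match valid_lists with
    | [] => []
    | first :: rest =>
      -- common = set(valid_lists[0]); for s in valid_lists[1:]: common &= s
      let common := rest.foldl (fun c s => PySem.Set.inter c s) (PySem.Set.ofList first)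
      PySem.List.sorted
        (common.filter
          (fun s => decide (min_length ≤ PySem.Str.len s) && decide (PySem.Str.len s ≤ max_length)))
        (fun x => x) false

-- ===== PORT B =====
-- the body of the 'for lst in string_lists' loop of Source B: state = (valid_count, counts)
def fcsLoop (acc : Int × PySem.Dict String Int) (lst : List String) : Int × PySem.Dict String Int :=
  if lst.isEmpty then acc
  else (acc.1 + 1,
        (PySem.List.dedup lst).foldl (fun d s => d.insert s (d.getD s 0 + 1)) acc.2)

def find_common_strings_alt (string_lists : List (List String)) (min_length : Int) (max_length : Int) : List String :=
  let st := string_lists.foldl fcsLoop (0, PySem.Dict.empty)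
  if st.1 == 0 then []
  else
    PySem.List.sorted
      ((st.2.items.filter
          (fun p => p.2 == st.1 && decide (min_length ≤ PySem.Str.len p.1)
                    && decide (PySem.Str.len p.1 ≤ max_length))).map (·.1))
      (fun x => x) false

-- ===== PRECONDITION & SPEC =====
def Spec_find_common_strings (string_lists : List (List String)) (min_length : Int) (max_length : Int) (out : List String) : Prop := out = find_common_strings_alt string_lists min_length max_length
instance (string_lists : List (List String)) (min_length : Int) (max_length : Int) (out : List String) : Decidable (Spec_find_common_strings string_lists min_length max_length out) := by unfold Spec_find_common_strings; infer_instance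

-- ===== CLAIM (what is proved, stated in full; the proofs are below) =====
def Claim_equal_find_common_strings : Prop := ∀ (string_lists : List (List String)) (min_length : Int) (max_length : Int), Dom_find_common_strings string_lists min_length max_length → Spec_find_common_strings string_lists min_length max_length (find_common_strings string_lists min_length max_length)

-- ===== LEMMAS AND PROOFS =====

-- membership in the A-side fold of intersections
lemma mem_foldl_inter (ls : List (List String)) (c : PySem.Set String) (x : String) :
    x ∈ ls.foldl (fun c s => PySem.Set.inter c s) c ↔ x ∈ c ∧ ∀ l ∈ ls, x ∈ l := by
  induction ls generalizing c with
  | nil => simp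
  | cons h t ih => simp [List.foldl_cons, ih, PySem.Set.mem_inter]; tauto

lemma nodup_foldl_inter (ls : List (List String)) (c : PySem.Set String) (hc : c.Nodup) :
    (ls.foldl (fun c s => PySem.Set.inter c s) c).Nodup := by
  induction ls generalizing c with
  | nil => exact hc
  | cons h t ih =>
    simp only [List.foldl_cons]
    exact ih _ (PySem.Set.nodup_inter c h hc)

-- B-side loop invariants
lemma fcsLoop_fst (ls : List (List String)) (st : Int × PySem.Dict String Int) :
    (ls.foldl fcsLoop st).1 = st.1 + ((ls.filter (fun l => !l.isEmpty)).length : Int) := by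
  induction ls generalizing st with
  | nil => simp
  | cons h t ih =>
    by_cases hh : h.isEmpty
    · simp [List.foldl_cons, fcsLoop, hh, ih]
    · rw [List.foldl_cons, fcsLoop, if_neg hh, ih]
      simp [hh]
      ring

lemma fcsLoop_getD (ls : List (List String)) (st : Int × PySem.Dict String Int) (x : String) :
    (ls.foldl fcsLoop st).2.getD x 0 =
      st.2.getD x 0 + (((ls.filter (fun l => !l.isEmpty)).countP (fun l => decide (x ∈ l))) : Int) := by
  induction ls generalizing st with
  | nil => simp
  | cons h t ih =>
    by_cases hh : h.isEmpty
    · have he : h = [] := List.isEmpty_iff.mp hh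
      simp [List.foldl_cons, fcsLoop, ih, he]
    · rw [List.foldl_cons, fcsLoop, if_neg hh, ih]
      rw [PySem.Dict.getD_foldl_insert_add_one]
      have hcnt : (PySem.List.dedup h).count x = if x ∈ h then 1 else 0 := by
        by_cases hx : x ∈ h
        · rw [if_pos hx]
          exact List.count_eq_one_of_mem (PySem.List.nodup_dedup h) (by simpa [PySem.List.mem_dedup] using hx)
        · rw [if_neg hx]
          exact List.count_eq_zero_of_not_mem (by simpa [PySem.List.mem_dedup] using hx)
      rw [hcnt]
      simp [List.countP_cons, hh]
      by_cases hx : x ∈ h <;> simp [hx] <;> ring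

lemma fcsLoop_nodup_keys (ls : List (List String)) (st : Int × PySem.Dict String Int)
    (h : st.2.keys.Nodup) : (ls.foldl fcsLoop st).2.keys.Nodup := by
  induction ls generalizing st with
  | nil => exact h
  | cons l t ih =>
    by_cases hl : l.isEmpty
    · simpa [List.foldl_cons, fcsLoop, hl] using ih st h
    · rw [List.foldl_cons, fcsLoop, if_neg hl]
      exact ih _ (PySem.Dict.nodup_keys_foldl_insert _ _ _ h)

-- the two pre-sort lists are permutations of each other
lemma pre_sort_perm (sl : List (List String)) (mn mx : Int) (first : List String)
    (rest : List (List String)) (hvm : sl.filter (fun lst => !lst.isEmpty) = first :: rest) :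
    ((rest.foldl (fun c s => PySem.Set.inter c s) (PySem.Set.ofList first)).filter
        (fun s => decide (mn ≤ PySem.Str.len s) && decide (PySem.Str.len s ≤ mx))).Perm
      (((sl.foldl fcsLoop (0, PySem.Dict.empty)).2.items.filter
          (fun p => p.2 == (sl.foldl fcsLoop (0, PySem.Dict.empty)).1
                    && decide (mn ≤ PySem.Str.len p.1)
                    && decide (PySem.Str.len p.1 ≤ mx))).map (·.1)) := by
  set st := sl.foldl fcsLoop (0, PySem.Dict.empty) with hst
  have hfst : st.1 = ((first :: rest).length : Int) := by
    simpa [hvm] using fcsLoop_fst sl (0, PySem.Dict.empty)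
  have hgetD : ∀ x : String, st.2.getD x 0 =
      (((first :: rest).countP (fun l => decide (x ∈ l))) : Int) := fun x => by
    simpa [hvm] using fcsLoop_getD sl (0, PySem.Dict.empty) x
  have hkeys : st.2.keys.Nodup := fcsLoop_nodup_keys sl _ (by simp)
  have hitems : (st.2.items.map (·.1)).Nodup := hkeys
  apply (List.perm_ext_iff_of_nodup ?_ ?_).mpr
  · intro x
    simp only [List.mem_filter, List.mem_map]
    constructor
    · rintro ⟨hxc, hcond⟩
      rw [mem_foldl_inter] at hxc
      have hall : ∀ l ∈ first :: rest, x ∈ l := by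
        intro l hl
        rcases hl with _ | hl
        · exact (PySem.Set.mem_ofList first x).mp hxc.1
        · exact hxc.2 _ (by assumption)
      have hcnt : st.2.getD x 0 = st.1 := by
        rw [hgetD, hfst]
        congr 1
        exact List.countP_eq_length.mpr (fun l hl => by simpa using hall l hl)
      have hget : st.2.get? x = some st.1 := by
        rcases hg : st.2.get? x with _ | v
        · rw [PySem.Dict.getD_of_get?_eq_none st.2 0 hg] at hcnt
          rw [hfst] at hcnt
          simp at hcnt
          omega
        · rw [PySem.Dict.getD_of_get?_eq_some st.2 0 hg] at hcnt
          rw [hcnt]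
      refine ⟨(x, st.1), ?_, rfl⟩
      simp only [List.mem_filter]
      refine ⟨PySem.Dict.mem_items_of_get?_eq_some st.2 hget, ?_⟩
      simpa using hcond
    · rintro ⟨⟨y, c⟩, hp, rfl⟩
      simp only [List.mem_filter] at hp
      obtain ⟨hpi, hcond⟩ := hp
      simp only [Bool.and_eq_true, beq_iff_eq] at hcond
      have hc : st.2.getD y 0 = c := PySem.Dict.getD_of_mem_items st.2 hpi hkeys 0
      have hcl : ((first :: rest).countP (fun l => decide (y ∈ l))) = (first :: rest).length := by
        have := hgetD y
        rw [hc, hcond.1.1, hfst] at this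
        exact_mod_cast this.symm
      have hall := List.countP_eq_length.mp hcl
      constructor
      · rw [mem_foldl_inter]
        exact ⟨(PySem.Set.mem_ofList first y).mpr (by simpa using hall first (by simp)),
               fun l hl => by simpa using hall l (by simp [hl])⟩
      · simp only [Bool.and_eq_true]
        exact ⟨hcond.1.2, hcond.2⟩
  · exact List.Nodup.filter _ (nodup_foldl_inter rest _ (PySem.Set.nodup_ofList first))
  · exact hitems.sublist (List.Sublist.map _ List.filter_sublist)

-- ===== VERDICT (by name: the statement is the Claim_ definition above) =====
theorem find_common_strings_spec : Claim_equal_find_common_strings := by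
  intro sl mn mx _
  unfold Spec_find_common_strings find_common_strings find_common_strings_alt
  have hfst : (sl.foldl fcsLoop (0, PySem.Dict.empty)).1 =
      ((sl.filter (fun l => !l.isEmpty)).length : Int) := by
    simpa using fcsLoop_fst sl (0, PySem.Dict.empty)
  cases hvm : sl.filter (fun lst => !lst.isEmpty) with
  | nil =>
    have h0 : (sl.foldl fcsLoop (0, PySem.Dict.empty)).1 = 0 := by rw [hfst, hvm]; simp
    by_cases hsl : sl.isEmpty <;> simp [hsl, h0]
  | cons first rest =>
    have hsl : sl.isEmpty = false := by
      rcases sl with _ | _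
      · simp at hvm
      · simp
    have h0 : ((sl.foldl fcsLoop (0, PySem.Dict.empty)).1 == 0) = false := by
      rw [hfst, hvm]
      simp
      omega
    simp only [hsl, Bool.false_eq_true, if_false, h0]
    exact PySem.List.sorted_eq_sorted_of_perm _ _ _ (fun a b h => h)
      (pre_sort_perm sl mn mx first rest hvm)
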